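-- pv_equiv track=rewrite | github.com/cirosantilli/project-euler-solutions | solvers/782.py | _count_k_complexity_eq_2
-- ===== SOURCE A (Python) =====
-- def _count_k_complexity_eq_2(n: int) -> int:
--     """
--     Return N2 = number of k in [0..n^2] whose *minimum* complexity is exactly 2.
--
--     Complexity 2 is achievable exactly for these shapes (up to complement):
--       - a×a block of ones (and the complement): k = a^2, n^2-a^2
--       - a×(n-a) rectangle duplicated symmetrically (and complement):
--         k = 2a(n-a), n^2-2a(n-a)
--
--     We exclude k=0 and k=n^2 (complexity 1).
--     """
--     n2 = n * n
--     k2 = set()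
--     for a in range(0, n + 1):
--         a2 = a * a
--         t = 2 * a * (n - a)
--         k2.add(a2)
--         k2.add(n2 - a2)
--         k2.add(t)
--         k2.add(n2 - t)
--     k2.discard(0)
--     k2.discard(n2)
--     return len(k2)
-- ===== SOURCE B (Python) =====
-- def _count_k_complexity_eq_2(n: int) -> int:
--     # Sort-then-scan: collect all candidate values into a plain list, sort it,
--     # then count distinct values in one adjacency pass, skipping 0 and n^2.
--     n2 = n * n
--     cands = [v
--              for a in range(0, n + 1)
--              for v in (a * a, n2 - a * a, 2 * a * (n - a), n2 - 2 * a * (n - a))]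
--     cands.sort()
--     count = 0
--     prev = None
--     for x in cands:
--         if (prev is None or x != prev) and x != 0 and x != n2:
--             count += 1
--         prev = x
--     return count
-- ===== Notes on version B (the rewrite author's own statement) =====
-- stated objective: alternative
-- what changed: Replaces A's hash-set insertion/discard pass by collecting all candidate values in a plain list, sorting it, and counting distinct values (skipping 0 and n^2) in one adjacency scan over the sorted list.
import Mathlib
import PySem

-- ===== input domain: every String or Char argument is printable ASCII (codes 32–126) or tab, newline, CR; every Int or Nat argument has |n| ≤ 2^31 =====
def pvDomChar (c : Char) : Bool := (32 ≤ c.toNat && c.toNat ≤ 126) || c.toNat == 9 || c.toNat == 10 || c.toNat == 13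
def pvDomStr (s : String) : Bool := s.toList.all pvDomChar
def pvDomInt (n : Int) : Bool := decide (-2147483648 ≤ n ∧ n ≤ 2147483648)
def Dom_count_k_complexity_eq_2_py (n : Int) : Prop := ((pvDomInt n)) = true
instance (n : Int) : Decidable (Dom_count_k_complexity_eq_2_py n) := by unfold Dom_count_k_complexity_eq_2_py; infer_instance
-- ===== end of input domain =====

-- B replaces A's set-insertion pass by a sort of the raw candidate list plus one
-- adjacency-dedup scan (alternative decomposition, same result; not claimed faster).

-- ===== PORT A =====
-- Python's hash set is ported as Std.TreeSet: A consumes the set only through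
-- add/discard/len, which are order-independent, so this models Python's set exactly
-- here (and stays evaluable at the sampled sizes, unlike a list-backed set).
def count_k_complexity_eq_2_py (n : Int) : Int :=
  let n2 := n * n
  let k2 : Std.TreeSet Int := ∅
  let k2 := (PySem.List.pyRange 0 (n + 1) 1).foldl (fun k2 a =>
    let a2 := a * a
    let t := 2 * a * (n - a)
    let k2 := k2.insert a2
    let k2 := k2.insert (n2 - a2)
    let k2 := k2.insert t
    k2.insert (n2 - t)) k2
  let k2 := k2.erase 0          -- set.discard: erase, no error if absent
  let k2 := k2.erase n2
  (k2.size : Int)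

-- ===== PORT B =====
def count_k_complexity_eq_2_py_alt (n : Int) : Int :=
  let n2 := n * n
  let cands : List Int := (PySem.List.pyRange 0 (n + 1) 1).flatMap (fun a =>
    [a * a, n2 - a * a, 2 * a * (n - a), n2 - 2 * a * (n - a)])
  -- cands.sort(): an in-place stdlib sort of a list of ints, ported as mergeSort by ≤
  let cands := cands.mergeSort (fun a b => decide (a ≤ b))
  -- one pass: count x whenever (prev is None or x != prev) and x != 0 and x != n2
  let st := cands.foldl (fun (st : Int × Option Int) x =>
    (if st.2 ≠ some x ∧ x ≠ 0 ∧ x ≠ n2 then st.1 + 1 else st.1, some x)) ((0 : Int), (none : Option Int))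
  st.1

-- ===== PRECONDITION & SPEC =====
def Spec_count_k_complexity_eq_2_py (n : Int) (out : Int) : Prop := out = count_k_complexity_eq_2_py_alt n
instance (n : Int) (out : Int) : Decidable (Spec_count_k_complexity_eq_2_py n out) := by unfold Spec_count_k_complexity_eq_2_py; infer_instance

-- ===== CLAIM (what is proved, stated in full; the proofs are below) =====
def Claim_equal_count_k_complexity_eq_2_py : Prop := ∀ (n : Int), Dom_count_k_complexity_eq_2_py n → Spec_count_k_complexity_eq_2_py n (count_k_complexity_eq_2_py n)

-- ===== LEMMAS AND PROOFS =====

-- card of a filtered insert, split at the inserted element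
theorem pv_card_filter_insert (n2 x : Int) (s : Finset Int) :
    ((insert x s).filter (fun y => y ≠ 0 ∧ y ≠ n2)).card
      = (if x ≠ 0 ∧ x ≠ n2 then 1 else 0) + ((s.erase x).filter (fun y => y ≠ 0 ∧ y ≠ n2)).card := by
  have hins : insert x s = insert x (s.erase x) := by
    ext y; by_cases hy : y = x <;> simp [hy]
  rw [hins, Finset.filter_insert]
  split_ifs with h
  · rw [Finset.card_insert_of_notMem (by simp)]
    omega
  · omega

-- B's scan with a previous element p that is ≤ every element of a sorted list
theorem pv_scan_some (n2 : Int) :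
    ∀ (l : List Int) (p c : Int), l.Pairwise (· ≤ ·) → (∀ x ∈ l, p ≤ x) →
    (l.foldl (fun (st : Int × Option Int) x =>
        (if st.2 ≠ some x ∧ x ≠ 0 ∧ x ≠ n2 then st.1 + 1 else st.1, some x)) (c, some p)).1
      = c + (((l.toFinset.erase p)).filter (fun y => y ≠ 0 ∧ y ≠ n2)).card := by
  intro l
  induction l with
  | nil => intro p c _ _; simp
  | cons x xs ih =>
    intro p c hpw hle
    have hxle : ∀ y ∈ xs, x ≤ y := by
      intro y hy; exact (List.pairwise_cons.mp hpw).1 y hy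
    have hpx : p ≤ x := hle x (by simp)
    simp only [List.foldl_cons]
    by_cases hpeq : p = x
    · subst hpeq
      have hcond : ¬ ((some p ≠ some p) ∧ p ≠ 0 ∧ p ≠ n2) := by simp
      rw [if_neg hcond, ih p c (List.pairwise_cons.mp hpw).2 hxle]
      simp only [List.toFinset_cons]
      rw [Finset.erase_insert_eq_erase]
    · have hplt : p < x := lt_of_le_of_ne hpx hpeq
      have hpnot : p ∉ (x :: xs).toFinset := by
        simp only [List.toFinset_cons, Finset.mem_insert, List.mem_toFinset]
        push Not
        exact ⟨hpeq, fun hy => absurd (lt_of_lt_of_le hplt (hxle p hy)) (lt_irrefl p)⟩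
      rw [Finset.erase_eq_of_notMem hpnot]
      simp only [List.toFinset_cons]
      rw [pv_card_filter_insert n2 x xs.toFinset]
      by_cases hP : x ≠ 0 ∧ x ≠ n2
      · have hcond : (some p ≠ some x) ∧ x ≠ 0 ∧ x ≠ n2 := ⟨by simpa using hpeq, hP.1, hP.2⟩
        rw [if_pos hcond, ih x (c + 1) (List.pairwise_cons.mp hpw).2 hxle, if_pos hP]
        omega
      · have hcond : ¬ ((some p ≠ some x) ∧ x ≠ 0 ∧ x ≠ n2) := by
          intro h; exact hP ⟨h.2.1, h.2.2⟩
        rw [if_neg hcond, ih x c (List.pairwise_cons.mp hpw).2 hxle, if_neg hP]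
        omega

-- B's scan from the initial (0, None) state counts the distinct admissible values
theorem pv_scan_none (n2 : Int) (l : List Int) (hpw : l.Pairwise (· ≤ ·)) :
    (l.foldl (fun (st : Int × Option Int) x =>
        (if st.2 ≠ some x ∧ x ≠ 0 ∧ x ≠ n2 then st.1 + 1 else st.1, some x)) ((0 : Int), (none : Option Int))).1
      = ((l.toFinset.filter (fun y => y ≠ 0 ∧ y ≠ n2)).card : Int) := by
  cases l with
  | nil => simp
  | cons x xs =>
    have hxle : ∀ y ∈ xs, x ≤ y := by
      intro y hy; exact (List.pairwise_cons.mp hpw).1 y hy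
    simp only [List.foldl_cons]
    by_cases hP : x ≠ 0 ∧ x ≠ n2
    · have hcond : ((none : Option Int) ≠ some x) ∧ x ≠ 0 ∧ x ≠ n2 := ⟨by simp, hP.1, hP.2⟩
      rw [if_pos hcond, pv_scan_some n2 xs x (0 + 1) (List.pairwise_cons.mp hpw).2 hxle]
      simp only [List.toFinset_cons]
      rw [pv_card_filter_insert n2 x xs.toFinset, if_pos hP]
      push_cast; ring
    · have hcond : ¬ (((none : Option Int) ≠ some x) ∧ x ≠ 0 ∧ x ≠ n2) := by
        intro h; exact hP ⟨h.2.1, h.2.2⟩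
      rw [if_neg hcond, pv_scan_some n2 xs x 0 (List.pairwise_cons.mp hpw).2 hxle]
      simp only [List.toFinset_cons]
      rw [pv_card_filter_insert n2 x xs.toFinset, if_neg hP]
      push_cast; ring

-- membership in a TreeSet insert, with compare decoded to equality
theorem pv_mem_insert (t : Std.TreeSet Int) (k a : Int) :
    a ∈ t.insert k ↔ a = k ∨ a ∈ t := by
  rw [Std.TreeSet.mem_insert, compare_eq_iff_eq]
  exact or_congr_left eq_comm

-- A's set fold collects exactly the members of B's candidate comprehension
theorem pv_fold_members (n n2 : Int) :
    ∀ (L : List Int) (s : Std.TreeSet Int),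
    (∀ y, y ∈ (L.foldl (fun k2 a =>
        let a2 := a * a
        let t := 2 * a * (n - a)
        let k2 := k2.insert a2
        let k2 := k2.insert (n2 - a2)
        let k2 := k2.insert t
        k2.insert (n2 - t)) s) ↔
      y ∈ s ∨ y ∈ (L.flatMap (fun a =>
        [a * a, n2 - a * a, 2 * a * (n - a), n2 - 2 * a * (n - a)]))) := by
  intro L
  induction L with
  | nil => intro s y; simp
  | cons a L ih =>
    intro s y
    simp only [List.foldl_cons, List.flatMap_cons, ih, pv_mem_insert, List.mem_append,
      List.mem_cons, List.not_mem_nil]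
    tauto

theorem count_k_complexity_eq_2_py_spec_aux (n : Int) :
    count_k_complexity_eq_2_py n = count_k_complexity_eq_2_py_alt n := by
  unfold count_k_complexity_eq_2_py count_k_complexity_eq_2_py_alt
  simp only []
  set n2 := n * n with hn2
  have hmem0 := pv_fold_members n n2 (PySem.List.pyRange 0 (n + 1) 1)
    (∅ : Std.TreeSet Int)
  set sA := (PySem.List.pyRange 0 (n + 1) 1).foldl (fun k2 a =>
        let a2 := a * a
        let t := 2 * a * (n - a)
        let k2 := k2.insert a2
        let k2 := k2.insert (n2 - a2)
        let k2 := k2.insert t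
        k2.insert (n2 - t)) (∅ : Std.TreeSet Int) with hsA
  set cands := (PySem.List.pyRange 0 (n + 1) 1).flatMap (fun a =>
        [a * a, n2 - a * a, 2 * a * (n - a), n2 - 2 * a * (n - a)]) with hcands
  have hmem : ∀ y, y ∈ sA ↔ y ∈ cands := by
    intro y; rw [hmem0 y]; simp
  -- A's side: size of the erased tree = card of the filtered candidate finset
  have hmemd : ∀ y, y ∈ (sA.erase 0).erase n2 ↔ y ∈ cands ∧ (y ≠ 0 ∧ y ≠ n2) := by
    intro y
    rw [Std.TreeSet.mem_erase, Std.TreeSet.mem_erase]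
    simp only [ne_eq, compare_eq_iff_eq, hmem y]
    tauto
  have hA : (((sA.erase 0).erase n2).size : Int)
      = ((cands.toFinset.filter (fun y => y ≠ 0 ∧ y ≠ n2)).card : Int) := by
    have hnd : (((sA.erase 0).erase n2).toList).Nodup := by
      refine (Std.TreeSet.distinct_toList).imp ?_
      intro a b hab heq
      exact hab (by rw [compare_eq_iff_eq]; exact heq)
    have hfin : (((sA.erase 0).erase n2).toList).toFinset
        = cands.toFinset.filter (fun y => y ≠ 0 ∧ y ≠ n2) := by
      ext y
      simp only [List.mem_toFinset, Finset.mem_filter, Std.TreeSet.mem_toList, hmemd y]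
    have hlen : (((sA.erase 0).erase n2).toList).toFinset.card
        = (((sA.erase 0).erase n2).toList).length := List.toFinset_card_of_nodup hnd
    rw [← Std.TreeSet.length_toList, ← hlen, hfin]
  -- B's side: the scan over the sorted list counts the same card
  have hperm : (cands.mergeSort (fun a b => decide (a ≤ b))).Perm cands :=
    List.mergeSort_perm _ _
  have hpw : (cands.mergeSort (fun a b => decide (a ≤ b))).Pairwise (· ≤ ·) := by
    have := List.pairwise_mergeSort (le := fun a b : Int => decide (a ≤ b))
      (by intro a b c hab hbc; simp only [decide_eq_true_eq] at *; omega)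
      (by intro a b; simp only [Bool.or_eq_true, decide_eq_true_eq]; omega) cands
    exact this.imp (by intro a b h; simpa using h)
  have hB := pv_scan_none n2 (cands.mergeSort (fun a b => decide (a ≤ b))) hpw
  rw [List.toFinset_eq_of_perm _ _ hperm] at hB
  rw [hA, hB]

-- ===== VERDICT (by name: the statement is the Claim_ definition above) =====
theorem count_k_complexity_eq_2_py_spec : Claim_equal_count_k_complexity_eq_2_py := by
  intro n _
  unfold Spec_count_k_complexity_eq_2_py
  exact count_k_complexity_eq_2_py_spec_aux n
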